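-- pv_equiv track=rewrite | github.com/smitkiri/ehr-relation-extraction | models/dict_ner.py | _get_clean_re
-- ===== SOURCE A (Python) =====
-- from typing import List
--
-- def _get_clean_re(entity_list: List[str]) -> str:
--     '''
--     Generates a regular expression from a list of entities
--
--     Parameters
--     ----------
--     entity_list : List[str]
--         List of entity text.
--
--     Returns
--     -------
--     entity_re : str
--         Regular expression.
--
--     '''
--     regex_chars = ['(', ')', '[', ']', '{', '}', '+', '*', '?', '$', '^', '&']
--
--     for i in range(len(entity_list)):
--         # We need to add a \ so it does not take entity text as regex
--         # character
--         for char in regex_chars: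
--             entity_list[i] = entity_list[i].replace(char,
--                                                     '\\' + char)
--
--     # A space/new line/tab before and after the text to indicate
--     # a seperate word
--     entity_re = '[\n| |\t]|[\n| |\t]'.join(entity_list)
--     entity_re = '[\n| |\t]' + entity_re + '[\n| |\t]'
--
--     return entity_re
-- ===== SOURCE B (Python) =====
-- from typing import List
--
-- _SPECIALS = frozenset('()[]{}+*?$^&')
--
-- def _get_clean_re(entity_list: List[str]) -> str:
--     # Single character-level pass per entity instead of 12 full replace() passes.
--     # Mutates entity_list in place, like the original.
--     for i in range(len(entity_list)):
--         out = []
--         for c in entity_list[i]: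
--             if c in _SPECIALS:
--                 out.append('\\')
--             out.append(c)
--         entity_list[i] = ''.join(out)
--
--     entity_re = '[\n| |\t]|[\n| |\t]'.join(entity_list)
--     return '[\n| |\t]' + entity_re + '[\n| |\t]'
-- ===== Notes on version B (the rewrite author's own statement) =====
-- stated objective: faster
-- what changed: Replaced the nested 12-pass str.replace loop per entity with one character-level pass using a frozenset membership test, appending '\' before each special character.
import Mathlib
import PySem

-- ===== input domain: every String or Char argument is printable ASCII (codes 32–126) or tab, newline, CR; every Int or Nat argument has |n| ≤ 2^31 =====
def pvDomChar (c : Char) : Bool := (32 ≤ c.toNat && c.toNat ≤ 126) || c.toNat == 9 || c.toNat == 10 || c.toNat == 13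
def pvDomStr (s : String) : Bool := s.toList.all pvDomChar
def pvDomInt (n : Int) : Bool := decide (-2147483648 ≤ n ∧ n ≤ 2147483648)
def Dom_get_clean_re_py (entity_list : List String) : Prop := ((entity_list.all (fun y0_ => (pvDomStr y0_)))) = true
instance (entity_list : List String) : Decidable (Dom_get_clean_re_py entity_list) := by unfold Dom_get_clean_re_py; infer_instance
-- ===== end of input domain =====

-- B replaces A's nested 12-pass str.replace loop with one character-level pass per entity
-- using a set membership test (objective: faster, constant-factor). A mutates entity_list in
-- place and so does B; the equivalence proved here is about the RETURN value only.

-- ===== PORT A =====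
-- regex_chars = ['(', ')', '[', ']', '{', '}', '+', '*', '?', '$', '^', '&']
def pvRegexChars : List Char := ['(', ')', '[', ']', '{', '}', '+', '*', '?', '$', '^', '&']

-- inner 'for char in regex_chars: entity_list[i] = entity_list[i].replace(char, "\\" + char)'
def pvEscapeA (s : List Char) : List Char :=
  pvRegexChars.foldl (fun cur ch => PySem.Chars.replace cur [ch] ['\\', ch]) s

def get_clean_re_py (entity_list : List String) : String :=
  let lst := entity_list.map (fun s => pvEscapeA s.toList)
  let entity_re := PySem.Chars.join "[\n| |\t]|[\n| |\t]".toList lst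
  String.ofList ("[\n| |\t]".toList ++ entity_re ++ "[\n| |\t]".toList)

-- ===== PORT B =====
-- _SPECIALS = frozenset('()[]{}+*?$^&')
def pvSpecials : PySem.Set Char :=
  PySem.Set.ofList "()[]{}+*?$^&".toList

-- one pass over the characters: prepend '\\' before each special character
def pvEscapeB (s : List Char) : List Char :=
  s.flatMap (fun c => if c ∈ pvSpecials then ['\\', c] else [c])

def get_clean_re_py_alt (entity_list : List String) : String :=
  let lst := entity_list.map (fun s => pvEscapeB s.toList)
  let entity_re := PySem.Chars.join "[\n| |\t]|[\n| |\t]".toList lst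
  String.ofList ("[\n| |\t]".toList ++ entity_re ++ "[\n| |\t]".toList)

-- ===== PRECONDITION & SPEC =====
def Spec_get_clean_re_py (entity_list : List String) (out : String) : Prop := out = get_clean_re_py_alt entity_list
instance (entity_list : List String) (out : String) : Decidable (Spec_get_clean_re_py entity_list out) := by unfold Spec_get_clean_re_py; infer_instance

-- ===== CLAIM (what is proved, stated in full; the proofs are below) =====
def Claim_equal_get_clean_re_py : Prop := ∀ (entity_list : List String), Dom_get_clean_re_py entity_list → Spec_get_clean_re_py entity_list (get_clean_re_py entity_list)

-- ===== LEMMAS AND PROOFS =====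

-- replace.go with a single-character pattern is the obvious per-character substitution
lemma replace_go_single (c : Char) (new : List Char) :
    ∀ (fuel : Nat) (s acc : List Char), s.length ≤ fuel →
      PySem.Chars.replace.go [c] new fuel s acc
        = acc.reverse ++ s.flatMap (fun x => if x = c then new else [x]) := by
  intro fuel
  induction fuel with
  | zero =>
      intro s acc h
      have hs : s = [] := List.eq_nil_of_length_eq_zero (Nat.le_zero.mp h)
      subst hs
      simp [PySem.Chars.replace.go]
  | succ n ih =>
      intro s acc h
      cases s with
      | nil => simp [PySem.Chars.replace.go]
      | cons x t =>
          by_cases hx : x = c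
          · subst hx
            have hpre : List.isPrefixOf [x] (x :: t) = true := by
              simp [List.isPrefixOf]
            rw [PySem.Chars.replace.go]
            simp only [hpre, if_true]
            rw [show List.drop [x].length (x :: t) = t from rfl]
            rw [ih t (new.reverse ++ acc) (by simpa using Nat.le_of_succ_le_succ h)]
            simp
          · have hpre : List.isPrefixOf [c] (x :: t) = false := by
              simp only [List.isPrefixOf, Bool.and_eq_false_iff]
              exact Or.inl (by simpa using fun h => hx h.symm)
            rw [PySem.Chars.replace.go]
            simp only [hpre]
            rw [ih t (x :: acc) (by simpa using Nat.le_of_succ_le_succ h)]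
            simp [hx]

lemma replace_single (c : Char) (new s : List Char) :
    PySem.Chars.replace s [c] new = s.flatMap (fun x => if x = c then new else [x]) := by
  rw [PySem.Chars.replace]
  simp [replace_go_single c new s.length s [] le_rfl]

-- folding single-char substitutions over a duplicate-free list of characters none of which
-- is '\' equals one flatMap that escapes exactly the characters of the list
lemma foldl_subst_eq_flatMap (cs : List Char) (hnd : cs.Nodup) (hb : '\\' ∉ cs) :
    ∀ s : List Char,
      cs.foldl (fun cur ch => cur.flatMap (fun x => if x = ch then ['\\', ch] else [x])) s
        = s.flatMap (fun x => if x ∈ cs then ['\\', x] else [x]) := by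
  induction cs with
  | nil => intro s; simp
  | cons c cs ih =>
      intro s
      have hnd' : cs.Nodup := hnd.of_cons
      have hc : c ∉ cs := by simpa using (List.nodup_cons.mp hnd).1
      have hb' : '\\' ∉ cs := fun h => hb (List.mem_cons_of_mem _ h)
      rw [List.foldl_cons, ih hnd' hb']
      rw [List.flatMap_assoc]
      apply List.flatMap_congr
      intro x _
      by_cases hx : x = c
      · subst hx
        simp [hc, fun h => hb' h]
      · simp [hx]

lemma mem_specials (x : Char) : x ∈ pvSpecials ↔ x ∈ pvRegexChars := by
  rw [pvSpecials, show "()[]{}+*?$^&".toList = pvRegexChars from rfl]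
  exact PySem.Set.mem_ofList _ _

lemma escapeA_eq_escapeB (s : List Char) : pvEscapeA s = pvEscapeB s := by
  have h := foldl_subst_eq_flatMap pvRegexChars (by decide) (by decide) s
  unfold pvEscapeA pvEscapeB
  rw [PySem.List.foldl_congr_mem pvRegexChars _
        (fun cur ch => cur.flatMap (fun x => if x = ch then ['\\', ch] else [x])) s
        (fun acc ch _ => replace_single ch ['\\', ch] acc)]
  rw [h]
  exact List.flatMap_congr (fun x _ => by simp only [mem_specials])

-- ===== VERDICT (by name: the statement is the Claim_ definition above) =====
theorem get_clean_re_py_spec : Claim_equal_get_clean_re_py := by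
  intro entity_list _
  unfold Spec_get_clean_re_py get_clean_re_py get_clean_re_py_alt
  simp only [escapeA_eq_escapeB]
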